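-- pv_equiv track=rewrite | github.com/AdiosMyLove/tests | Task1/Task1.py | circular_array_path
-- ===== SOURCE A (Python) =====
-- def circular_array_path(n, m):
--     # Создаём круговой массив
--     array = list(range(1, n + 1))
--     path = []
--     current_index = 0
--
--     while True:
--         # Запоминаем начальный элемент текущего интервала
--         path.append(array[current_index])
--         # Вычисляем индекс конца интервала
--         next_index = (current_index + m - 1) % n
--         # Если вернулись к первому элементу, останавливаемся
--         if next_index == 0:
--             break
--         # Переходим к следующему интервалу
--         current_index = next_index
--
--     return ''.join(map(str, path))
-- ===== SOURCE B (Python) =====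
-- def circular_array_path(n, m):
--     d = (m - 1) % n
--     g, r = n, d
--     while r:
--         g, r = r, g % r
--     L = n // g
--     return ''.join(str(k * d % n + 1) for k in range(L))
-- ===== Notes on version B (the rewrite author's own statement) =====
-- stated objective: alternative
-- what changed: B replaces A's step-by-step while-loop over a materialized list(range(1,n+1)) with a closed form: it computes the step d=(m-1)%n, the traversal length L=n//gcd(n,d) by Euclid's algorithm, and emits element k*d%n+1 for k in range(L) directly, never building the n-element array.
import Mathlib
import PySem

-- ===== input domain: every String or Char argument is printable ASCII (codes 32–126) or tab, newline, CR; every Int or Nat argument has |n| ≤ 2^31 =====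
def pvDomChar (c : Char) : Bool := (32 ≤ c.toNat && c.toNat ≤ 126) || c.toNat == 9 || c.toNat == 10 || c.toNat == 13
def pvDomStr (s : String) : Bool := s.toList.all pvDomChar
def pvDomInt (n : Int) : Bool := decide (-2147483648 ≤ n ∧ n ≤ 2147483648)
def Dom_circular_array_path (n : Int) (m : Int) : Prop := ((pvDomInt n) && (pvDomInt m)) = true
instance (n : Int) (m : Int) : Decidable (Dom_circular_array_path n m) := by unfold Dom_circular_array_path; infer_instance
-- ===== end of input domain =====

-- B builds the path from the closed-form index sequence k*d % n (d = (m-1) % n, length n // gcd(n,d))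
-- instead of A's step-by-step while-loop over a materialized array; equal return value on Pre_ (n ≥ 1).

-- ===== PORT A =====
-- A's `while True` loop: path.append(array[cur]); next=(cur+m-1)%n; break if next==0 else cur=next.
-- Ported with fuel n.toNat, which bounds the number of iterations on every input with n ≥ 1
-- (proved below: the loop makes exactly n // gcd(n, (m-1) % n) ≤ n appends).
def carrLoop (n m : Int) (array : List Int) : Nat → Int → List Int → List Int
  | 0, _, path => path
  | fuel+1, cur, path =>
    match PySem.List.pyGet? array cur with
    | none => path          -- IndexError in Python; excluded by Pre_ (n ≥ 1 keeps 0 ≤ cur < n)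
    | some v =>
      let path' := path ++ [v]
      let next := PySem.Int.mod (cur + m - 1) n
      if next = 0 then path'
      else carrLoop n m array fuel next path'

def circular_array_path (n : Int) (m : Int) : String :=
  let array := PySem.List.pyRange 1 (n+1) 1
  let path := carrLoop n m array n.toNat 0 []
  PySem.Str.join "" (path.map PySem.Int.toStr)

-- ===== PORT B =====
-- termination of the hand-written Euclid loop in Source B: Python's % shrinks |r|
theorem carrGcd_dec (g r : Int) (h : r ≠ 0) : (PySem.Int.mod g r).natAbs < r.natAbs := by
  rcases lt_or_gt_of_ne h with hr | hr
  · have := PySem.Int.mod_neg_bounds (a := g) hr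
    omega
  · have h1 := PySem.Int.mod_nonneg (a := g) hr
    have h2 := PySem.Int.mod_lt (a := g) hr
    omega

-- Source B: g, r = n, d; while r: g, r = r, g % r
def carrGcd (g r : Int) : Int :=
  if _h : r = 0 then g else carrGcd r (PySem.Int.mod g r)
termination_by r.natAbs
decreasing_by exact carrGcd_dec g r _h

def circular_array_path_alt (n : Int) (m : Int) : String :=
  let d := PySem.Int.mod (m - 1) n
  let g := carrGcd n d
  let L := PySem.Int.floordiv n g
  PySem.Str.join "" ((PySem.List.pyRange 0 L 1).map (fun k => PySem.Int.toStr (PySem.Int.mod (k * d) n + 1)))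

-- ===== PRECONDITION & SPEC =====
-- Python A raises IndexError (array[0] on an empty array) for every n ≤ 0; exactly that is excluded.
def Pre_circular_array_path (n : Int) (m : Int) : Prop := 1 ≤ n
instance (n : Int) (m : Int) : Decidable (Pre_circular_array_path n m) := by unfold Pre_circular_array_path; infer_instance
def pvWitness_circular_array_path : Int × Int := (6, 4)

def Spec_circular_array_path (n : Int) (m : Int) (out : String) : Prop := out = circular_array_path_alt n m
instance (n : Int) (m : Int) (out : String) : Decidable (Spec_circular_array_path n m out) := by unfold Spec_circular_array_path; infer_instance

-- ===== CLAIM (what is proved, stated in full; the proofs are below) =====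
def Claim_equal_circular_array_path : Prop := ∀ (n : Int) (m : Int), Dom_circular_array_path n m → Pre_circular_array_path n m → Spec_circular_array_path n m (circular_array_path n m)

-- ===== LEMMAS AND PROOFS =====

-- the Euclid loop computes Nat.gcd on nonnegative inputs
theorem carrGcd_eq (g r : Int) (hg : 0 ≤ g) (hr : 0 ≤ r) :
    carrGcd g r = (Nat.gcd g.toNat r.toNat : Int) := by
  by_cases h : r = 0
  · subst h
    rw [carrGcd]
    simp [Int.toNat_of_nonneg hg]
  · have hrpos : 0 < r := lt_of_le_of_ne hr (Ne.symm h)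
    rw [carrGcd, dif_neg h]
    have hmod : PySem.Int.mod g r = g % r := PySem.Int.mod_eq_emod_of_pos hrpos
    have hmn : 0 ≤ PySem.Int.mod g r := PySem.Int.mod_nonneg _ hrpos
    rw [carrGcd_eq r (PySem.Int.mod g r) hr hmn]
    congr 1
    have htn : (PySem.Int.mod g r).toNat = g.toNat % r.toNat := by
      lift g to Nat using hg
      lift r to Nat using hr
      rw [hmod, ← Int.natCast_mod, Int.toNat_natCast, Int.toNat_natCast, Int.toNat_natCast]
    rw [htn, Nat.gcd_comm, ← Nat.gcd_rec, Nat.gcd_comm]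
termination_by r.natAbs
decreasing_by exact carrGcd_dec g r h

-- N ∣ k*D ↔ (N / gcd N D) ∣ k, for positive N (elementary number theory)
theorem dvd_mul_iff_len (N D k : Nat) (hN : 0 < N) :
    N ∣ k * D ↔ (N / Nat.gcd N D) ∣ k := by
  set g := Nat.gcd N D with hg
  have hGpos : 0 < g := by rw [hg]; exact Nat.gcd_pos_of_pos_left D hN
  obtain ⟨N1, hN1⟩ : g ∣ N := by rw [hg]; exact Nat.gcd_dvd_left N D
  obtain ⟨D1, hD1⟩ : g ∣ D := by rw [hg]; exact Nat.gcd_dvd_right N D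
  have hquot : N / g = N1 := Nat.div_eq_of_eq_mul_left hGpos (hN1.trans (Nat.mul_comm _ _))
  have hquotD : D / g = D1 := Nat.div_eq_of_eq_mul_left hGpos (hD1.trans (Nat.mul_comm _ _))
  have hcop : Nat.Coprime N1 D1 := by
    have h0 := Nat.coprime_div_gcd_div_gcd (m := N) (n := D) (Nat.gcd_pos_of_pos_left D hN)
    rwa [← hg, hquot, hquotD] at h0
  rw [hquot]
  constructor
  · intro h
    have h4 : g * N1 ∣ g * (k * D1) := by
      rw [← hN1, show g * (k * D1) = k * (g * D1) from by ring, ← hD1]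
      exact h
    exact hcop.dvd_of_dvd_mul_right ((Nat.mul_dvd_mul_iff_left hGpos).mp h4)
  · rintro ⟨t, rfl⟩
    exact ⟨t * D1, by rw [hN1, hD1]; ring⟩

-- A's loop, started at residue j·d % n, unrolls into the closed-form segment of length L - j
theorem loop_spec (n m : Int) (hn : 1 ≤ n) :
    ∀ (fuel j : Nat) (path : List Int),
      j + 1 ≤ n.toNat / Nat.gcd n.toNat (PySem.Int.mod (m-1) n).toNat →
      n.toNat / Nat.gcd n.toNat (PySem.Int.mod (m-1) n).toNat - j ≤ fuel →
      carrLoop n m (PySem.List.pyRange 1 (n+1) 1) fuel (((j : Int) * PySem.Int.mod (m-1) n) % n) path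
        = path ++ (List.range' j (n.toNat / Nat.gcd n.toNat (PySem.Int.mod (m-1) n).toNat - j)).map
            (fun (k : Nat) => ((k : Int) * PySem.Int.mod (m-1) n) % n + 1) := by
  have hnpos : 0 < n := hn
  set d := PySem.Int.mod (m-1) n with hd
  set L := n.toNat / Nat.gcd n.toNat d.toNat with hL
  have hd0 : 0 ≤ d := PySem.Int.mod_nonneg _ hnpos
  have hdn : d < n := PySem.Int.mod_lt _ hnpos
  have hkey : ∀ k : Nat, (((k : Int) * d) % n = 0 ↔ L ∣ k) := by
    intro k
    have hc : ((k : Int) * d) % n = (((k * d.toNat) % n.toNat : Nat) : Int) := by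
      rw [Int.natCast_mod]
      push_cast [Int.toNat_of_nonneg hd0, Int.toNat_of_nonneg (le_of_lt hnpos)]
      rfl
    rw [hc]
    rw [show (((k * d.toNat) % n.toNat : Nat) : Int) = 0 ↔ (k * d.toNat) % n.toNat = 0 from by exact_mod_cast Iff.rfl]
    rw [← Nat.dvd_iff_mod_eq_zero]
    exact dvd_mul_iff_len n.toNat d.toNat k (by omega)
  have hdd : (m - 1) % n = d % n := by
    conv_rhs => rw [hd, PySem.Int.mod_eq_emod_of_pos hnpos, Int.emod_emod_of_dvd _ dvd_rfl]
  intro fuel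
  induction fuel with
  | zero => intro j path h1 h2; exfalso; omega
  | succ f ih =>
    intro j path h1 h2
    have hcur0 : 0 ≤ ((j : Int) * d) % n := Int.emod_nonneg _ (by omega)
    have hcurn : ((j : Int) * d) % n < n := Int.emod_lt_of_pos _ hnpos
    have hget : PySem.List.pyGet? (PySem.List.pyRange 1 (n+1) 1) (((j : Int) * d) % n)
        = some (1 + ((j : Int) * d) % n) := by
      rw [PySem.List.pyGet?_of_nonneg _ hcur0, PySem.List.getElem?_pyRange_one,
        if_pos (by omega), Int.toNat_of_nonneg hcur0]
    have hnext : PySem.Int.mod (((j : Int) * d) % n + m - 1) n = (((j+1 : Nat) : Int) * d) % n := by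
      rw [PySem.Int.mod_eq_emod_of_pos hnpos,
        show ((j : Int) * d) % n + m - 1 = ((j : Int) * d) % n + (m - 1) from by ring,
        Int.emod_add_emod, Int.add_emod ((j : Int) * d) (m-1), hdd, ← Int.add_emod]
      congr 1
      push_cast
      ring
    rw [carrLoop, hget]
    dsimp only
    rw [hnext]
    by_cases hbreak : j + 1 = L
    · rw [if_pos ((hkey (j+1)).mpr (hbreak ▸ dvd_refl L))]
      have hone : L - j = 1 := by omega
      rw [hone, List.range'_one]
      simp only [List.map_cons, List.map_nil]
      rw [show (1 : Int) + ((j : Int) * d) % n = ((j : Int) * d) % n + 1 from by ring]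
    · have hlt : j + 1 < L := by omega
      have hne : ¬ ((((j+1 : Nat) : Int) * d) % n = 0) := by
        rw [hkey (j+1)]
        intro hdvd
        have := Nat.le_of_dvd (by omega) hdvd
        omega
      rw [if_neg hne]
      rw [ih (j+1) (path ++ [1 + ((j : Int) * d) % n]) (by omega) (by omega)]
      rw [show L - j = (L - (j+1)) + 1 from by omega, List.range'_succ, List.map_cons]
      simp only [List.append_assoc, List.cons_append, List.nil_append]
      rw [show (1 : Int) + ((j : Int) * d) % n = ((j : Int) * d) % n + 1 from by ring]

-- ===== VERDICT (by name: the statement is the Claim_ definition above) =====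
theorem circular_array_path_spec : Claim_equal_circular_array_path := by
  unfold Claim_equal_circular_array_path
  intro n m _ hpre
  unfold Pre_circular_array_path at hpre
  unfold Spec_circular_array_path
  have hnpos : 0 < n := hpre
  simp only [circular_array_path, circular_array_path_alt]
  set d := PySem.Int.mod (m - 1) n with hd
  have hd0 : 0 ≤ d := PySem.Int.mod_nonneg _ hnpos
  have hn' : n = (n.toNat : Int) := (Int.toNat_of_nonneg (by omega)).symm
  set N := n.toNat with hN
  set G := Nat.gcd N d.toNat with hG
  set L := N / G with hLdef
  have hNpos : 0 < N := by omega
  have hGpos : 0 < G := Nat.gcd_pos_of_pos_left _ hNpos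
  have hL1 : 1 ≤ L := Nat.div_pos (Nat.le_of_dvd hNpos (Nat.gcd_dvd_left _ _)) hGpos
  have hLN : L ≤ N := Nat.div_le_self _ _
  -- A side: unroll the loop from j = 0
  have hA := loop_spec n m hpre N 0 []
  simp only [Nat.cast_zero, zero_mul, Int.zero_emod, Nat.sub_zero, List.nil_append] at hA
  rw [hA (by omega) (by omega)]
  -- B side: Euclid = gcd, floordiv = L, range
  have hB1 : carrGcd n d = (G : Int) := carrGcd_eq n d (by omega) hd0
  have hfd : PySem.Int.floordiv n (G : Int) = (L : Int) := by
    rw [hn']; exact PySem.Int.floordiv_natCast N G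
  rw [hB1, hfd, PySem.List.pyRange_zero_nat]
  rw [← List.range_eq_range', List.map_map, List.map_map]
  apply congrArg
  apply List.map_congr_left
  intro k _
  simp only [Function.comp]
  conv_rhs => rw [PySem.Int.mod_eq_emod_of_pos hnpos]
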